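-- pv_equiv track=rewrite | github.com/CognitiveScale/cortex-certifai-examples | tutorials/bringing_in_your_own_model_cli/utils/german_credit_schema.py | map_german_encoding_to_label
-- ===== SOURCE A (Python) =====
-- feature_names = ['checkingstatus', 'duration', 'history', 'purpose', 'amount', 'savings', 'employ', 'installment', 'status', 'others', 'residence', 'property', 'age', 'otherplans', 'housing', 'cards', 'job', 'liable', 'telephone', 'foreign']
--
-- var_xwalk = {'checkingstatus':{
-- 'A11' : '... < 0 DM',
-- 'A12' : '0 <= ... < 200 DM',
-- 'A13' : '... >= 200 DM / salary assignments for at least 1 year',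
-- 'A14' : 'no checking account'},
-- 'history':{
-- 'A30' : 'no credits taken/ all credits paid back duly',
-- 'A31' : 'all credits at this bank paid back duly',
-- 'A32' : 'existing credits paid back duly till now',
-- 'A33' : 'delay in paying off in the past',
-- 'A34' : 'critical account/ other credits existing (not at this bank)'},
-- 'purpose':{
-- 'A40' : 'car (new)',
-- 'A41' : 'car (used)',
-- 'A42' : 'furniture/equipment',
-- 'A43' : 'radio/television',
-- 'A44' : 'domestic appliances',
-- 'A45' : 'repairs',
-- 'A46' : 'education',
-- 'A47' : 'vacation',
-- 'A48' : 'retraining',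
-- 'A49' : 'business',
-- 'A410' : 'purpose - others'},
-- 'savings' : {
-- 'A61' : '... < 100 DM',
-- 'A62' : '100 <= ... < 500 DM',
-- 'A63' : '500 <= ... < 1000 DM',
-- 'A64' : '.. >= 1000 DM',
-- 'A65' : 'unknown/ no savings account'},
-- 'employ' : {
-- 'A71' : 'unemployed',
-- 'A72' : '... < 1 year',
-- 'A73' : '1 <= ... < 4 years',
-- 'A74' : '4 <= ... < 7 years',
-- 'A75' : '.. >= 7 years'},
-- 'status' : {
-- 'A91' : 'male : divorced/separated',
-- 'A92' : 'female : divorced/separated/married',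
-- 'A93' : 'male : single',
-- 'A94' : 'male : married/widowed',
-- 'A95' : 'female : single (does not exist)'},
-- 'age' : {'> 25 years' : '> 25 years',
--         '<= 25 years' : '<= 25 years'},
-- 'others' : {
-- 'A101' : 'others - none',
-- 'A102' : 'co-applicant',
-- 'A103' : 'guarantor'},
-- 'property' : {
-- 'A121' : 'real estate',
-- 'A122' : 'building society savings agreement/ life insurance',
-- 'A123' : 'car or other, not in attribute 6',
-- 'A124' : 'unknown / no property'},
-- 'otherplans' : {
-- 'A141' : 'bank',
-- 'A142' : 'stores',
-- 'A143' : 'none'},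
-- 'housing' : {
-- 'A151' : 'rent',
-- 'A152' : 'own',
-- 'A153' : 'for free'},
-- 'job' : {
-- 'A171' : 'unemployed/ unskilled - non-resident',
-- 'A172' : 'unskilled - resident',
-- 'A173' : 'skilled employee / official',
-- 'A174' : 'management/ self-employed/highly qualified employee/ officer'},
-- 'telephone' : {
-- 'A191' : 'phone - none',
-- 'A192' : 'phone - yes, registered under the customers name'},
-- 'foreign' : {
-- 'A201' : 'foreign - yes',
-- 'A202' : 'foreign - no'},
-- 'outcome' : {
-- 1 : 'Good',
-- 2 : 'Bad'}}
--
-- def map_german_encoding_to_label(german_dict):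
--     new_german_dict = {}
--     for i in range(len(feature_names)):
--         if feature_names[i] in var_xwalk:
--             input_keys = list(german_dict.keys())
--
--             if input_keys[0] in var_xwalk[feature_names[i]].keys():
--                 #populate new dictionary
--                 for x in german_dict:
--                     new_german_dict[var_xwalk[feature_names[i]][x]] = german_dict[x]
--     return new_german_dict
-- ===== SOURCE B (Python) =====
-- # B: one flat code->label dict (codes are globally unique across features), merged once
-- # in feature_names order; per call: one membership test on the first key, one mapping pass.
-- _code_to_label = {
--     'A11': '... < 0 DM',
--     'A12': '0 <= ... < 200 DM',
--     'A13': '... >= 200 DM / salary assignments for at least 1 year',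
--     'A14': 'no checking account',
--     'A30': 'no credits taken/ all credits paid back duly',
--     'A31': 'all credits at this bank paid back duly',
--     'A32': 'existing credits paid back duly till now',
--     'A33': 'delay in paying off in the past',
--     'A34': 'critical account/ other credits existing (not at this bank)',
--     'A40': 'car (new)',
--     'A41': 'car (used)',
--     'A42': 'furniture/equipment',
--     'A43': 'radio/television',
--     'A44': 'domestic appliances',
--     'A45': 'repairs',
--     'A46': 'education',
--     'A47': 'vacation',
--     'A48': 'retraining',
--     'A49': 'business',
--     'A410': 'purpose - others',
--     'A61': '... < 100 DM',
--     'A62': '100 <= ... < 500 DM',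
--     'A63': '500 <= ... < 1000 DM',
--     'A64': '.. >= 1000 DM',
--     'A65': 'unknown/ no savings account',
--     'A71': 'unemployed',
--     'A72': '... < 1 year',
--     'A73': '1 <= ... < 4 years',
--     'A74': '4 <= ... < 7 years',
--     'A75': '.. >= 7 years',
--     'A91': 'male : divorced/separated',
--     'A92': 'female : divorced/separated/married',
--     'A93': 'male : single',
--     'A94': 'male : married/widowed',
--     'A95': 'female : single (does not exist)',
--     'A101': 'others - none',
--     'A102': 'co-applicant',
--     'A103': 'guarantor',
--     'A121': 'real estate',
--     'A122': 'building society savings agreement/ life insurance',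
--     'A123': 'car or other, not in attribute 6',
--     'A124': 'unknown / no property',
--     '> 25 years': '> 25 years',
--     '<= 25 years': '<= 25 years',
--     'A141': 'bank',
--     'A142': 'stores',
--     'A143': 'none',
--     'A151': 'rent',
--     'A152': 'own',
--     'A153': 'for free',
--     'A171': 'unemployed/ unskilled - non-resident',
--     'A172': 'unskilled - resident',
--     'A173': 'skilled employee / official',
--     'A174': 'management/ self-employed/highly qualified employee/ officer',
--     'A191': 'phone - none',
--     'A192': 'phone - yes, registered under the customers name',
--     'A201': 'foreign - yes',
--     'A202': 'foreign - no'}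
--
-- def map_german_encoding_to_label(german_dict):
--     first_key = list(german_dict.keys())[0]
--     if first_key not in _code_to_label:
--         return {}
--     return {_code_to_label[k]: v for k, v in german_dict.items()}
-- ===== Notes on version B (the rewrite author's own statement) =====
-- stated objective: simpler
-- what changed: A scans all 20 feature names, re-testing the input's first key against each feature's nested crosswalk table; B merges the per-feature tables once into a single flat code-to-label dict (codes are globally unique), so each call is one membership test on the first key followed by one mapping pass over the items.
import Mathlib
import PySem

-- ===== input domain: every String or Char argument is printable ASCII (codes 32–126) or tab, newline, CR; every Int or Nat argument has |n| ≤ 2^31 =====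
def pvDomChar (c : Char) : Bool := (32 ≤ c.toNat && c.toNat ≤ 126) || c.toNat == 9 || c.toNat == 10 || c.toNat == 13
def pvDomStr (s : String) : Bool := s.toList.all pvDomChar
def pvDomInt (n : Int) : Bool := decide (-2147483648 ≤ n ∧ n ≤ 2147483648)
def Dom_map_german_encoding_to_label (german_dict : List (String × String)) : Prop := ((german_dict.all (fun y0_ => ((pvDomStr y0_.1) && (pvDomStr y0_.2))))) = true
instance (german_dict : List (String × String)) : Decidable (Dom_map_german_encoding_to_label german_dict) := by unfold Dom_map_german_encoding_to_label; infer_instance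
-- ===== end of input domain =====

-- B replaces A's scan over all 20 feature names (each re-testing the input's first key against that
-- feature's nested crosswalk table) by ONE flat code->label dict merged once (codes are globally
-- unique across features): one membership test, then one mapping pass (simpler decomposition;
-- equal return values proved below on Pre_).

-- ===== PORT A =====
-- Module-level data of A: feature_names and var_xwalk. The 'outcome' entry of var_xwalk is omitted:
-- its keys are ints, 'outcome' is not in feature_names, so A never reads it.
def pvXwalk : PySem.Dict String (PySem.Dict String String) := PySem.Dict.mk [
  ("checkingstatus", PySem.Dict.mk [("A11", "... < 0 DM"), ("A12", "0 <= ... < 200 DM"), ("A13", "... >= 200 DM / salary assignments for at least 1 year"), ("A14", "no checking account")]),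
  ("history", PySem.Dict.mk [("A30", "no credits taken/ all credits paid back duly"), ("A31", "all credits at this bank paid back duly"), ("A32", "existing credits paid back duly till now"), ("A33", "delay in paying off in the past"), ("A34", "critical account/ other credits existing (not at this bank)")]),
  ("purpose", PySem.Dict.mk [("A40", "car (new)"), ("A41", "car (used)"), ("A42", "furniture/equipment"), ("A43", "radio/television"), ("A44", "domestic appliances"), ("A45", "repairs"), ("A46", "education"), ("A47", "vacation"), ("A48", "retraining"), ("A49", "business"), ("A410", "purpose - others")]),
  ("savings", PySem.Dict.mk [("A61", "... < 100 DM"), ("A62", "100 <= ... < 500 DM"), ("A63", "500 <= ... < 1000 DM"), ("A64", ".. >= 1000 DM"), ("A65", "unknown/ no savings account")]),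
  ("employ", PySem.Dict.mk [("A71", "unemployed"), ("A72", "... < 1 year"), ("A73", "1 <= ... < 4 years"), ("A74", "4 <= ... < 7 years"), ("A75", ".. >= 7 years")]),
  ("status", PySem.Dict.mk [("A91", "male : divorced/separated"), ("A92", "female : divorced/separated/married"), ("A93", "male : single"), ("A94", "male : married/widowed"), ("A95", "female : single (does not exist)")]),
  ("age", PySem.Dict.mk [("> 25 years", "> 25 years"), ("<= 25 years", "<= 25 years")]),
  ("others", PySem.Dict.mk [("A101", "others - none"), ("A102", "co-applicant"), ("A103", "guarantor")]),
  ("property", PySem.Dict.mk [("A121", "real estate"), ("A122", "building society savings agreement/ life insurance"), ("A123", "car or other, not in attribute 6"), ("A124", "unknown / no property")]),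
  ("otherplans", PySem.Dict.mk [("A141", "bank"), ("A142", "stores"), ("A143", "none")]),
  ("housing", PySem.Dict.mk [("A151", "rent"), ("A152", "own"), ("A153", "for free")]),
  ("job", PySem.Dict.mk [("A171", "unemployed/ unskilled - non-resident"), ("A172", "unskilled - resident"), ("A173", "skilled employee / official"), ("A174", "management/ self-employed/highly qualified employee/ officer")]),
  ("telephone", PySem.Dict.mk [("A191", "phone - none"), ("A192", "phone - yes, registered under the customers name")]),
  ("foreign", PySem.Dict.mk [("A201", "foreign - yes"), ("A202", "foreign - no")])]
def pvFeatureNames : List String := ["checkingstatus", "duration", "history", "purpose", "amount", "savings", "employ", "installment", "status", "others", "residence", "property", "age", "otherplans", "housing", "cards", "job", "liable", "telephone", "foreign"]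

def map_german_encoding_to_label (german_dict : List (String × String)) : List (String × String) :=
  let gdict := PySem.Dict.ofList german_dict
  ((List.range pvFeatureNames.length).foldl (fun (newd : PySem.Dict String String) i =>
    match pvXwalk.get? (pvFeatureNames.getD i "") with
    | none => newd
    | some table =>
      let input_keys := gdict.keys
      match PySem.List.pyGet? input_keys 0 with
      | none => newd
      | some k0 =>
        if table.keys.contains k0 then
          input_keys.foldl (fun acc x =>
            acc.insert (table.getD x "") (gdict.getD x "")) newd
        else newd) PySem.Dict.empty).items

-- ===== PORT B =====
-- _code_to_label of Source B: the per-feature tables merged once, in feature_names order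
def pvFlat : PySem.Dict String String := PySem.Dict.mk [
  ("A11", "... < 0 DM"),
  ("A12", "0 <= ... < 200 DM"),
  ("A13", "... >= 200 DM / salary assignments for at least 1 year"),
  ("A14", "no checking account"),
  ("A30", "no credits taken/ all credits paid back duly"),
  ("A31", "all credits at this bank paid back duly"),
  ("A32", "existing credits paid back duly till now"),
  ("A33", "delay in paying off in the past"),
  ("A34", "critical account/ other credits existing (not at this bank)"),
  ("A40", "car (new)"),
  ("A41", "car (used)"),
  ("A42", "furniture/equipment"),
  ("A43", "radio/television"),
  ("A44", "domestic appliances"),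
  ("A45", "repairs"),
  ("A46", "education"),
  ("A47", "vacation"),
  ("A48", "retraining"),
  ("A49", "business"),
  ("A410", "purpose - others"),
  ("A61", "... < 100 DM"),
  ("A62", "100 <= ... < 500 DM"),
  ("A63", "500 <= ... < 1000 DM"),
  ("A64", ".. >= 1000 DM"),
  ("A65", "unknown/ no savings account"),
  ("A71", "unemployed"),
  ("A72", "... < 1 year"),
  ("A73", "1 <= ... < 4 years"),
  ("A74", "4 <= ... < 7 years"),
  ("A75", ".. >= 7 years"),
  ("A91", "male : divorced/separated"),
  ("A92", "female : divorced/separated/married"),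
  ("A93", "male : single"),
  ("A94", "male : married/widowed"),
  ("A95", "female : single (does not exist)"),
  ("A101", "others - none"),
  ("A102", "co-applicant"),
  ("A103", "guarantor"),
  ("A121", "real estate"),
  ("A122", "building society savings agreement/ life insurance"),
  ("A123", "car or other, not in attribute 6"),
  ("A124", "unknown / no property"),
  ("> 25 years", "> 25 years"),
  ("<= 25 years", "<= 25 years"),
  ("A141", "bank"),
  ("A142", "stores"),
  ("A143", "none"),
  ("A151", "rent"),
  ("A152", "own"),
  ("A153", "for free"),
  ("A171", "unemployed/ unskilled - non-resident"),
  ("A172", "unskilled - resident"),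
  ("A173", "skilled employee / official"),
  ("A174", "management/ self-employed/highly qualified employee/ officer"),
  ("A191", "phone - none"),
  ("A192", "phone - yes, registered under the customers name"),
  ("A201", "foreign - yes"),
  ("A202", "foreign - no")]
def map_german_encoding_to_label_alt (german_dict : List (String × String)) : List (String × String) :=
  let gdict := PySem.Dict.ofList german_dict
  match PySem.List.pyGet? gdict.keys 0 with
  | none => []          -- Source B raises IndexError here, like A; outside Pre_
  | some first_key =>
    if pvFlat.contains first_key then
      (gdict.items.foldl (fun (acc : PySem.Dict String String) kv =>
        acc.insert (pvFlat.getD kv.1 "") kv.2) PySem.Dict.empty).items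
    else []

-- ===== PRECONDITION & SPEC =====
-- the crosswalk tables of the features present in var_xwalk, in feature_names order
def pvTables : List (PySem.Dict String String) := pvFeatureNames.filterMap pvXwalk.get?

-- Pre_ excludes exactly: the empty dict (A raises IndexError on input_keys[0]); inputs whose first key
-- belongs to some feature's table while another key does not (A raises KeyError); and association lists
-- with duplicate keys (they do not represent a Python dict, A's parameter type).
def Pre_map_german_encoding_to_label (german_dict : List (String × String)) : Prop :=
  german_dict ≠ [] ∧ (german_dict.map Prod.fst).Nodup ∧
  ∀ t ∈ pvTables, (german_dict.headD ("", "")).1 ∈ t.keys →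
    ∀ k ∈ german_dict.map Prod.fst, k ∈ t.keys
instance (german_dict : List (String × String)) : Decidable (Pre_map_german_encoding_to_label german_dict) := by unfold Pre_map_german_encoding_to_label; infer_instance

def pvWitness_map_german_encoding_to_label : (List (String × String)) := [("A30", "x"), ("A32", "y")]

def Spec_map_german_encoding_to_label (german_dict : List (String × String)) (out : List (String × String)) : Prop := out = map_german_encoding_to_label_alt german_dict
instance (german_dict : List (String × String)) (out : List (String × String)) : Decidable (Spec_map_german_encoding_to_label german_dict out) := by unfold Spec_map_german_encoding_to_label; infer_instance

-- ===== CLAIM (what is proved, stated in full; the proofs are below) =====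
def Claim_equal_map_german_encoding_to_label : Prop := ∀ (german_dict : List (String × String)), Dom_map_german_encoding_to_label german_dict → Pre_map_german_encoding_to_label german_dict → Spec_map_german_encoding_to_label german_dict (map_german_encoding_to_label german_dict)

-- ===== LEMMAS AND PROOFS =====
-- B's flat dict is exactly the concatenation of the per-feature tables, in feature_names order
set_option maxRecDepth 10000 in
lemma pv_flat_eq : pvFlat = PySem.Dict.mk (pvTables.flatMap fun t => t.items) := by decide

-- on the keys of any individual table, the flat lookup agrees with that table's lookup
set_option maxRecDepth 100000 in
lemma pv_flat_agrees : ∀ t ∈ pvTables, ∀ x ∈ t.keys, pvFlat.getD x "" = t.getD x "" := by decide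

lemma pv_get?_mk_find (l : List (String × String)) (k : String) :
    (PySem.Dict.mk l).get? k = (l.find? (fun p => p.1 == k)).map (fun p => p.2) := by
  induction l with
  | nil => rfl
  | cons p l ih =>
    rw [PySem.Dict.get?_mk_cons]
    by_cases h : p.1 = k
    · rw [List.find?_cons_of_pos (by simpa using h), if_pos (by simpa using h)]
      rfl
    · rw [List.find?_cons_of_neg (by simpa using h), if_neg (by simpa using h)]
      exact ih

lemma pv_find?_some_of_mem_keys (t : PySem.Dict String String) (k : String) (h : k ∈ t.keys) :
    ∃ v, t.items.find? (fun p => p.1 == k) = some v := by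
  obtain ⟨p, hp, hpk⟩ := List.mem_map.mp h
  have hs : (t.items.find? (fun p => p.1 == k)).isSome := by
    rw [List.find?_isSome]
    exact ⟨p, hp, by simp [hpk]⟩
  exact Option.isSome_iff_exists.mp hs

lemma pv_find?_none_of_not_mem_keys (t : PySem.Dict String String) (k : String) (h : k ∉ t.keys) :
    t.items.find? (fun p => p.1 == k) = none := by
  rw [List.find?_eq_none]
  intro p hp
  simp only [beq_iff_eq]
  exact fun hpk => h (List.mem_map.mpr ⟨p, hp, hpk⟩)

lemma pv_find?_flatMap_items (T : List (PySem.Dict String String)) (k : String) :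
    (T.flatMap fun t => t.items).find? (fun p => p.1 == k)
      = (T.find? (fun t => t.keys.contains k)).bind (fun t => t.items.find? (fun p => p.1 == k)) := by
  induction T with
  | nil => simp
  | cons t T ih =>
    rw [List.flatMap_cons, List.find?_append]
    by_cases h : k ∈ t.keys
    · obtain ⟨v, hv⟩ := pv_find?_some_of_mem_keys t k h
      rw [hv, List.find?_cons_of_pos (by simpa using h)]
      simp [hv]
    · rw [pv_find?_none_of_not_mem_keys t k h, List.find?_cons_of_neg (by simpa using h)]
      simpa using ih

lemma pv_flat_get? (k : String) :
    pvFlat.get? k = ((pvTables.find? (fun t => t.keys.contains k)).bind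
      (fun t => t.items.find? (fun p => p.1 == k))).map (fun p => p.2) := by
  rw [pv_flat_eq, pv_get?_mk_find, pv_find?_flatMap_items]

lemma pv_foldl_inactive {β : Type} (T : List (PySem.Dict String String))
    (c : PySem.Dict String String → Bool) (g : β → PySem.Dict String String → β) (b : β)
    (h : ∀ u ∈ T, c u = false) :
    T.foldl (fun b t => if c t then g b t else b) b = b := by
  induction T generalizing b with
  | nil => rfl
  | cons t T ih =>
    rw [List.foldl_cons, if_neg (by simp [h t (by simp)])]
    exact ih _ fun u hu => h u (by simp [hu])

lemma pv_foldl_once {β : Type} (T : List (PySem.Dict String String))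
    (c : PySem.Dict String String → Bool) (g : β → PySem.Dict String String → β) (init : β)
    (hp : T.Pairwise (fun t u => c t = true → c u = true → False)) :
    T.foldl (fun b t => if c t then g b t else b) init
      = match T.find? c with | none => init | some t => g init t := by
  induction T generalizing init with
  | nil => rfl
  | cons t T ih =>
    rcases List.pairwise_cons.mp hp with ⟨h1, h2⟩
    cases h : c t with
    | true =>
      rw [List.foldl_cons, List.find?_cons_of_pos h, if_pos h]
      exact pv_foldl_inactive T c g _ fun u hu => by
        cases hcu : c u with
        | false => rfl
        | true => exact absurd (h1 u hu h hcu) not_false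
    | false =>
      rw [List.foldl_cons, List.find?_cons_of_neg (by simp [h]), if_neg (by simp [h])]
      exact ih _ h2

set_option maxRecDepth 10000 in
lemma pv_disjoint : pvTables.Pairwise (fun t u => ∀ k ∈ t.keys, k ∉ u.keys) := by decide

lemma pv_ofList_nodup (l : List (String × String)) (h : (l.map Prod.fst).Nodup) :
    PySem.Dict.ofList l = PySem.Dict.mk l := by
  apply PySem.Dict.ext
  show (List.foldl (fun acc p => acc.insert p.1 p.2) PySem.Dict.empty l).items = l
  have := PySem.Dict.items_foldl_insert_fresh l Prod.fst Prod.snd PySem.Dict.empty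
    (fun a _ => by simp [PySem.Dict.contains_empty]) h
  simpa using this

set_option maxRecDepth 100000 in
lemma pv_main (german_dict : List (String × String))
    (hpre : Pre_map_german_encoding_to_label german_dict) :
    map_german_encoding_to_label german_dict = map_german_encoding_to_label_alt german_dict := by
  obtain ⟨hne, hnd, hsame⟩ := hpre
  obtain ⟨⟨k0, v0⟩, rest, rfl⟩ : ∃ p rest, german_dict = p :: rest := by
    cases german_dict with
    | nil => exact absurd rfl hne
    | cons p rest => exact ⟨p, rest, rfl⟩
  set gd : List (String × String) := (k0, v0) :: rest with hgd
  have hofl : PySem.Dict.ofList gd = PySem.Dict.mk gd := pv_ofList_nodup gd hnd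
  have hk : PySem.List.pyGet? (PySem.Dict.mk gd).keys 0 = some k0 := by
    simp [PySem.Dict.keys, hgd, PySem.List.pyGet?, PySem.List.pyIdx?]
  have hA : map_german_encoding_to_label gd =
      (pvTables.foldl (fun (newd : PySem.Dict String String) table =>
        match PySem.List.pyGet? (PySem.Dict.ofList gd).keys 0 with
        | none => newd
        | some k0 =>
          if table.keys.contains k0 then
            (PySem.Dict.ofList gd).keys.foldl (fun acc x =>
              acc.insert (table.getD x "") ((PySem.Dict.ofList gd).getD x "")) newd
          else newd) PySem.Dict.empty).items := rfl
  rw [hofl] at hA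
  simp only [hk] at hA
  rw [pv_foldl_once _ _ _ _ (pv_disjoint.imp (fun {t u} h hct hcu =>
    ((by simpa using h k0 (by simpa using hct) : k0 ∉ u.keys)) (by simpa using hcu)))] at hA
  have hB : map_german_encoding_to_label_alt gd =
      (if pvFlat.contains k0 then
        ((PySem.Dict.mk gd).items.foldl (fun (acc : PySem.Dict String String) kv =>
          acc.insert (pvFlat.getD kv.1 "") kv.2) PySem.Dict.empty).items
       else []) := by
    show (match PySem.List.pyGet? (PySem.Dict.ofList gd).keys 0 with
      | none => []
      | some first_key =>
        if pvFlat.contains first_key then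
          ((PySem.Dict.ofList gd).items.foldl (fun (acc : PySem.Dict String String) (kv : String × String) =>
            acc.insert (pvFlat.getD kv.1 "") kv.2) PySem.Dict.empty).items
        else []) = _
    rw [hofl]
    simp only [hk]
  have hcontains : pvFlat.contains k0
      = ((pvTables.find? (fun t => t.keys.contains k0)).isSome) := by
    rw [PySem.Dict.contains_eq_isSome_get?, pv_flat_get?]
    cases hfind : pvTables.find? (fun t => t.keys.contains k0) with
    | none => simp
    | some t =>
      have hmem : k0 ∈ t.keys := by simpa using List.find?_some hfind
      obtain ⟨v, hv⟩ := pv_find?_some_of_mem_keys t k0 hmem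
      simp [hv]
  rw [hA, hB]
  cases hfind : pvTables.find? (fun t => t.keys.contains k0) with
  | none =>
    rw [hcontains, hfind]
    rfl
  | some t =>
    rw [hcontains, hfind]
    simp only [Option.isSome_some, if_pos]
    show ((PySem.Dict.mk gd).keys.foldl (fun acc x =>
        acc.insert (t.getD x "") ((PySem.Dict.mk gd).getD x "")) PySem.Dict.empty).items = _
    have hkeys : (PySem.Dict.mk gd).keys = gd.map Prod.fst := rfl
    have htmem : t ∈ pvTables := List.mem_of_find?_eq_some hfind
    have hk0t : k0 ∈ t.keys := by simpa using List.find?_some hfind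
    have hall : ∀ x ∈ gd.map Prod.fst, x ∈ t.keys := by
      intro x hx
      exact hsame t htmem (by simpa [hgd] using hk0t) x hx
    rw [hkeys, List.foldl_map]
    congr 1
    apply PySem.List.foldl_congr_mem
    intro acc kv hkv
    have hkvk : kv.1 ∈ t.keys := hall kv.1 (List.mem_map.mpr ⟨kv, hkv, rfl⟩)
    rw [pv_flat_agrees t htmem kv.1 hkvk,
      PySem.Dict.getD_of_mem_items (PySem.Dict.mk gd) (show kv ∈ (PySem.Dict.mk gd).items from hkv)
        (by simpa [hkeys] using hnd) ""]

-- ===== VERDICT (by name: the statement is the Claim_ definition above) =====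
theorem map_german_encoding_to_label_spec : Claim_equal_map_german_encoding_to_label := by
  intro german_dict _ hpre
  unfold Spec_map_german_encoding_to_label
  exact pv_main german_dict hpre
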